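-- pv_equiv track=rewrite | github.com/Pitt-IshiharaLab/pykarambola | pykarambola/io_poly.py | _tokenize_with_parens
-- ===== SOURCE A (Python) =====
-- def _tokenize_with_parens(s):
--     """Tokenize a string respecting parentheses grouping."""
--     tokens = []
--     current = ""
--     paren_depth = 0
--     for ch in s:
--         if ch == "(":
--             paren_depth += 1
--             current += ch
--         elif ch == ")":
--             paren_depth -= 1
--             current += ch
--         elif ch in (" ", "\t") and paren_depth == 0:
--             if current:
--                 tokens.append(current)
--                 current = ""
--         else:
--             current += ch
--     if current:
--         tokens.append(current)
--     return tokens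
-- ===== SOURCE B (Python) =====
-- def _tokenize_with_parens(s):
--     """Tokenize a string respecting parentheses grouping.
--
--     Token-at-a-time two-pointer scan: skip top-level separators, then
--     find the end of the next token and slice it out, instead of
--     maintaining a character-by-character token buffer."""
--     tokens = []
--     i, n = 0, len(s)
--     while i < n:
--         # skip separators (we are always at paren depth 0 here)
--         while i < n and s[i] in (" ", "\t"):
--             i += 1
--         if i == n:
--             break
--         j, depth = i, 0
--         while j < n and not (depth == 0 and s[j] in (" ", "\t")):
--             if s[j] == "(":
--                 depth += 1
--             elif s[j] == ")":
--                 depth -= 1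
--             j += 1
--         tokens.append(s[i:j])
--         i = j
--     return tokens
-- ===== Notes on version B (the rewrite author's own statement) =====
-- stated objective: alternative
-- what changed: Replaced A's per-character state machine that grows a token buffer with a token-at-a-time two-pointer scan: skip top-level separators, then find the token's end while tracking paren depth and slice it out (valid because the depth is always 0 at token boundaries).
import Mathlib
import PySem

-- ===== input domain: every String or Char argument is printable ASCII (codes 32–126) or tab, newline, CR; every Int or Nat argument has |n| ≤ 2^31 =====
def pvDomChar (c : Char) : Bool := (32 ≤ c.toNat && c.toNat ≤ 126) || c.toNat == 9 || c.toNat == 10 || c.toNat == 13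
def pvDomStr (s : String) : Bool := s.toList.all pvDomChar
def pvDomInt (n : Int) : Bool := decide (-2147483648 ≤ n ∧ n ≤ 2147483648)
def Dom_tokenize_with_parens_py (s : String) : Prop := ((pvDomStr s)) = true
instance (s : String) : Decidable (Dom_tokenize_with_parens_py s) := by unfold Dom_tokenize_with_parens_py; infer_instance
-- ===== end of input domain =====

-- B replaces A's per-character token-buffer state machine by a token-at-a-time
-- two-pointer scan (skip top-level separators, then slice out the next token);
-- objective: alternative decomposition, same O(n) cost.

-- ===== PORT A =====
-- A's loop body: state is (tokens, current buffer, paren depth); strings are lists of chars.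
def pvStepA (st : List String × List Char × Int) (ch : Char) : List String × List Char × Int :=
  if ch = '(' then (st.1, st.2.1 ++ [ch], st.2.2 + 1)
  else if ch = ')' then (st.1, st.2.1 ++ [ch], st.2.2 - 1)
  else if (ch = ' ' ∨ ch = '\t') ∧ st.2.2 = 0 then
    if st.2.1 ≠ [] then (st.1 ++ [String.mk st.2.1], [], st.2.2) else st
  else (st.1, st.2.1 ++ [ch], st.2.2)

def tokenize_with_parens_py (s : String) : List String :=
  let r := s.toList.foldl pvStepA ([], [], 0)
  if r.2.1 ≠ [] then r.1 ++ [String.mk r.2.1] else r.1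

-- ===== PORT B =====
-- Source B's inner while: advance past the next token, tracking depth; returns (token, rest).
def pvTakeTok : List Char → Int → List Char × List Char
  | [], _ => ([], [])
  | c :: cs, d =>
    if d = 0 ∧ (c = ' ' ∨ c = '\t') then ([], c :: cs)
    else
      let d' := if c = '(' then d + 1 else if c = ')' then d - 1 else d
      let p := pvTakeTok cs d'
      (c :: p.1, p.2)

-- needed by pvTokensB's termination proof
theorem pvTakeTok_rest_le : ∀ (cs : List Char) (d : Int), (pvTakeTok cs d).2.length ≤ cs.length
  | [], _ => by simp [pvTakeTok]
  | c :: cs, d => by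
    by_cases h : d = 0 ∧ (c = ' ' ∨ c = '\t')
    · simp [pvTakeTok, h]
    · simp only [pvTakeTok, if_neg h]
      have := pvTakeTok_rest_le cs (if c = '(' then d + 1 else if c = ')' then d - 1 else d)
      simpa using Nat.le_succ_of_le this

-- Source B's outer while loop: skip separators (always at depth 0 there), else slice a token.
def pvTokensB : List Char → List String
  | [] => []
  | c :: cs =>
    if h : c = ' ' ∨ c = '\t' then pvTokensB cs
    else
      let p := pvTakeTok (c :: cs) 0
      String.mk p.1 :: pvTokensB p.2
termination_by cs => cs.length
decreasing_by
  · simp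
  · have h2 : (pvTakeTok (c :: cs) 0).2.length ≤ cs.length := by
      rw [pvTakeTok, if_neg (fun hh => h hh.2)]
      exact pvTakeTok_rest_le cs _
    simp only [List.length_cons]
    omega

def tokenize_with_parens_py_alt (s : String) : List String := pvTokensB s.toList

-- ===== PRECONDITION & SPEC =====
def Spec_tokenize_with_parens_py (s : String) (out : List String) : Prop := out = tokenize_with_parens_py_alt s
instance (s : String) (out : List String) : Decidable (Spec_tokenize_with_parens_py s out) := by unfold Spec_tokenize_with_parens_py; infer_instance

-- ===== CLAIM (what is proved, stated in full; the proofs are below) =====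
def Claim_equal_tokenize_with_parens_py : Prop := ∀ (s : String), Dom_tokenize_with_parens_py s → Spec_tokenize_with_parens_py s (tokenize_with_parens_py s)

-- ===== LEMMAS AND PROOFS =====

-- A's loop, with the final `if current` flush applied, as a direct recursion.
def pvGo : List Char → Int → List Char → List String
  | cur, _, [] => if cur ≠ [] then [String.mk cur] else []
  | cur, d, c :: cs =>
    if c = '(' then pvGo (cur ++ [c]) (d + 1) cs
    else if c = ')' then pvGo (cur ++ [c]) (d - 1) cs
    else if (c = ' ' ∨ c = '\t') ∧ d = 0 then
      (if cur ≠ [] then [String.mk cur] else []) ++ pvGo [] 0 cs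
    else pvGo (cur ++ [c]) d cs

theorem pvFoldA_go : ∀ (cs : List Char) (toks : List String) (cur : List Char) (d : Int),
    (if (cs.foldl pvStepA (toks, cur, d)).2.1 ≠ [] then
       (cs.foldl pvStepA (toks, cur, d)).1 ++ [String.mk (cs.foldl pvStepA (toks, cur, d)).2.1]
     else (cs.foldl pvStepA (toks, cur, d)).1) = toks ++ pvGo cur d cs
  | [], toks, cur, d => by
    by_cases h : cur = [] <;> simp [pvGo, h]
  | c :: cs, toks, cur, d => by
    rw [List.foldl_cons]
    by_cases h1 : c = '('
    · subst h1
      rw [show pvStepA (toks, cur, d) '(' = (toks, cur ++ ['('], d + 1) from by simp [pvStepA]]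
      rw [pvFoldA_go cs toks (cur ++ ['(']) (d + 1)]
      simp [pvGo]
    · by_cases h2 : c = ')'
      · subst h2
        rw [show pvStepA (toks, cur, d) ')' = (toks, cur ++ [')'], d - 1) from by simp [pvStepA]]
        rw [pvFoldA_go cs toks (cur ++ [')']) (d - 1)]
        simp [pvGo]
      · by_cases h3 : (c = ' ' ∨ c = '\t') ∧ d = 0
        · obtain ⟨hsep, hd⟩ := h3
          subst hd
          by_cases h4 : cur = []
          · subst h4
            rw [show pvStepA (toks, [], 0) c = (toks, [], 0) from by simp [pvStepA, h1, h2, hsep]]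
            rw [pvFoldA_go cs toks [] 0]
            simp [pvGo, h1, h2, hsep]
          · rw [show pvStepA (toks, cur, 0) c = (toks ++ [String.mk cur], [], 0) from by
              simp [pvStepA, h1, h2, hsep, h4]]
            rw [pvFoldA_go cs (toks ++ [String.mk cur]) [] 0]
            simp [pvGo, h1, h2, hsep, h4]
        · rw [show pvStepA (toks, cur, d) c = (toks, cur ++ [c], d) from by
            simp [pvStepA, h1, h2]
            intro hs hd; exact absurd ⟨hs, hd⟩ h3]
          rw [pvFoldA_go cs toks (cur ++ [c]) d]
          simp [pvGo, h1, h2, h3]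

theorem pvTokensB_sep {c : Char} (cs : List Char) (h : c = ' ' ∨ c = '\t') :
    pvTokensB (c :: cs) = pvTokensB cs := by
  rw [pvTokensB]; simp [h]

theorem pvTokensB_notsep {c : Char} (cs : List Char) (h : ¬ (c = ' ' ∨ c = '\t')) :
    pvTokensB (c :: cs) =
      String.mk (pvTakeTok (c :: cs) 0).1 :: pvTokensB (pvTakeTok (c :: cs) 0).2 := by
  rw [pvTokensB]; simp [h]

theorem pvGo_tokensB : ∀ (n : Nat) (cs : List Char), cs.length ≤ n →
    (pvGo [] 0 cs = pvTokensB cs) ∧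
    (∀ (d : Int) (cur : List Char), cur ≠ [] →
      pvGo cur d cs = String.mk (cur ++ (pvTakeTok cs d).1) :: pvTokensB (pvTakeTok cs d).2) := by
  intro n
  induction n with
  | zero =>
    intro cs hlen
    have hcs : cs = [] := List.eq_nil_of_length_eq_zero (Nat.le_zero.mp hlen)
    subst hcs
    exact ⟨by simp [pvGo, pvTokensB], fun d cur hcur => by
      simp [pvGo, pvTakeTok, pvTokensB, hcur]⟩
  | succ n ih =>
    intro cs hlen
    match cs with
    | [] =>
      exact ⟨by simp [pvGo, pvTokensB], fun d cur hcur => by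
        simp [pvGo, pvTakeTok, pvTokensB, hcur]⟩
    | c :: cs =>
      have hlen' : cs.length ≤ n := by simpa using hlen
      constructor
      · by_cases h1 : c = '('
        · subst h1
          rw [pvTokensB_notsep cs (by decide)]
          rw [show pvTakeTok ('(' :: cs) 0 = ('(' :: (pvTakeTok cs 1).1, (pvTakeTok cs 1).2) from by
            rw [pvTakeTok]; simp]
          have hih := (ih cs hlen').2 1 ['('] (by simp)
          simp only [pvGo]
          simpa using hih
        · by_cases h2 : c = ')'
          · subst h2
            rw [pvTokensB_notsep cs (by decide)]
            rw [show pvTakeTok (')' :: cs) 0 = (')' :: (pvTakeTok cs (-1)).1, (pvTakeTok cs (-1)).2) from by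
              rw [pvTakeTok]; simp]
            have hih := (ih cs hlen').2 (-1) [')'] (by simp)
            simp only [pvGo]
            simpa using hih
          · by_cases h3 : c = ' ' ∨ c = '\t'
            · have hl : pvGo [] 0 (c :: cs) = pvGo [] 0 cs := by
                simp [pvGo, h1, h2, h3]
              rw [hl, pvTokensB_sep cs h3, (ih cs hlen').1]
            · rw [pvTokensB_notsep cs h3]
              rw [show pvTakeTok (c :: cs) 0 = (c :: (pvTakeTok cs 0).1, (pvTakeTok cs 0).2) from by
                rw [pvTakeTok, if_neg (fun hh => h3 hh.2)]; simp [h1, h2]]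
              have hih := (ih cs hlen').2 0 [c] (by simp)
              have hg : pvGo [] 0 (c :: cs) = pvGo [c] 0 cs := by
                simp [pvGo, h1, h2, h3]
              rw [hg]
              simpa using hih
      · intro d cur hcur
        by_cases h1 : c = '('
        · subst h1
          rw [show pvTakeTok ('(' :: cs) d = ('(' :: (pvTakeTok cs (d+1)).1, (pvTakeTok cs (d+1)).2) from by
            rw [pvTakeTok, if_neg (by simp)]; simp]
          have hih := (ih cs hlen').2 (d + 1) (cur ++ ['(']) (by simp)
          simp only [pvGo, ite_true]
          rw [hih]
          simp
        · by_cases h2 : c = ')'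
          · subst h2
            rw [show pvTakeTok (')' :: cs) d = (')' :: (pvTakeTok cs (d-1)).1, (pvTakeTok cs (d-1)).2) from by
              rw [pvTakeTok, if_neg (by simp)]; simp]
            have hih := (ih cs hlen').2 (d - 1) (cur ++ [')']) (by simp)
            have hg : pvGo cur d (')' :: cs) = pvGo (cur ++ [')']) (d - 1) cs := by
              simp [pvGo]
            rw [hg, hih]
            simp
          · by_cases h3 : (c = ' ' ∨ c = '\t') ∧ d = 0
            · obtain ⟨hsep, hd⟩ := h3
              subst hd
              rw [show pvTakeTok (c :: cs) 0 = ([], c :: cs) from by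
                rw [pvTakeTok, if_pos ⟨rfl, hsep⟩]]
              have hg : pvGo cur 0 (c :: cs) = [String.mk cur] ++ pvGo [] 0 cs := by
                simp [pvGo, h1, h2, hsep, hcur]
              rw [hg, pvTokensB_sep cs hsep, (ih cs hlen').1]
              simp
            · rw [show pvTakeTok (c :: cs) d =
                    (c :: (pvTakeTok cs (if c = '(' then d + 1 else if c = ')' then d - 1 else d)).1,
                     (pvTakeTok cs (if c = '(' then d + 1 else if c = ')' then d - 1 else d)).2) from by
                rw [pvTakeTok, if_neg (fun hh => h3 ⟨hh.2, hh.1⟩)]]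
              simp only [if_neg h1, if_neg h2]
              have hih := (ih cs hlen').2 d (cur ++ [c]) (by simp)
              have hg : pvGo cur d (c :: cs) = pvGo (cur ++ [c]) d cs := by
                simp [pvGo, h1, h2]
                intro hs hd; exact absurd ⟨hs, hd⟩ h3
              rw [hg, hih]
              simp

-- ===== VERDICT (by name: the statement is the Claim_ definition above) =====
theorem tokenize_with_parens_py_spec : Claim_equal_tokenize_with_parens_py := by
  intro s _
  unfold Spec_tokenize_with_parens_py tokenize_with_parens_py tokenize_with_parens_py_alt
  have h1 := pvFoldA_go s.toList [] [] 0
  simp only [List.nil_append] at h1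
  rw [h1, (pvGo_tokensB s.toList.length s.toList le_rfl).1]
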